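-- pv_equiv track=rewrite | github.com/canelhasmateus/leet | signal/practice-001/001.py | solution
-- ===== SOURCE A (Python) =====
-- def solution( numbers ):
--
-- 	res = []
-- 	for i in range( len( numbers ) - 2 ):
--
-- 		first, second, third = numbers[ i : i + 3 ]
--
-- 		if first < second > third or first > second < third:
-- 			z = 1
-- 		else:
-- 			z = 0
--
-- 		res.append( z )
--
-- 	return res
-- ===== SOURCE B (Python) =====
-- def solution(numbers):
--     # Two passes: first a -1/0/1 relation table of adjacent comparisons,
--     # then flag positions where consecutive relations point strictly opposite ways.
--     s = [(numbers[i] < numbers[i + 1]) - (numbers[i] > numbers[i + 1])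
--          for i in range(len(numbers) - 1)]
--     return [1 if s[i] * s[i + 1] == -1 else 0 for i in range(len(numbers) - 2)]
-- ===== Notes on version B (the rewrite author's own statement) =====
-- stated objective: alternative
-- what changed: Replaces A's single pass over three-element windows (slice, unpack, compound comparison) by a two-pass decomposition: first a -1/0/1 table of adjacent comparison signs, then a pass flagging positions where consecutive signs multiply to -1.
import Mathlib
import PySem

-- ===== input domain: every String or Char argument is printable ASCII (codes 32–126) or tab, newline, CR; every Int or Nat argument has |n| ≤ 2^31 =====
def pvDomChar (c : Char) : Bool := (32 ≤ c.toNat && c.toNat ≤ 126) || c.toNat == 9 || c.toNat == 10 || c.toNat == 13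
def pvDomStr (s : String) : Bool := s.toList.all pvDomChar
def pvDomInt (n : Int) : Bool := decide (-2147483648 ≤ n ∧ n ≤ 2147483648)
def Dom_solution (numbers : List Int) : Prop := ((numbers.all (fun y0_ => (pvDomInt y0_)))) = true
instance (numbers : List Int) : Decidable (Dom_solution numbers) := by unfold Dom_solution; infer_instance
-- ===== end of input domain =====

-- B replaces A's single windowed three-element scan by a two-pass decomposition: a -1/0/1
-- adjacent-relation table, then a pass flagging where consecutive relations strictly oppose.

-- ===== PORT A =====
-- A: for i in range(len-2): unpack numbers[i:i+3]; append 1 iff peak or valley.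
def solution (numbers : List Int) : List Int :=
  (PySem.List.pyRange 0 ((numbers.length : Int) - 2) 1).foldl (fun res i =>
    let win := PySem.List.slice numbers (some i) (some (i + 3))
    let first := PySem.List.pyGetD win 0 0
    let second := PySem.List.pyGetD win 1 0
    let third := PySem.List.pyGetD win 2 0
    let z : Int := if (first < second ∧ second > third) ∨ (first > second ∧ second < third) then 1 else 0
    res ++ [z]) []

-- ===== PORT B =====
-- B: s[i] = (numbers[i] < numbers[i+1]) - (numbers[i] > numbers[i+1]); result[i] = 1 iff s[i]*s[i+1] == -1.
def solution_alt (numbers : List Int) : List Int :=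
  let s := (PySem.List.pyRange 0 ((numbers.length : Int) - 1) 1).map (fun i =>
    (if PySem.List.pyGetD numbers i 0 < PySem.List.pyGetD numbers (i + 1) 0 then (1 : Int) else 0) -
    (if PySem.List.pyGetD numbers (i + 1) 0 < PySem.List.pyGetD numbers i 0 then (1 : Int) else 0))
  (PySem.List.pyRange 0 ((numbers.length : Int) - 2) 1).map (fun i =>
    if PySem.List.pyGetD s i 0 * PySem.List.pyGetD s (i + 1) 0 = -1 then (1 : Int) else 0)

-- ===== PRECONDITION & SPEC =====
def Spec_solution (numbers : List Int) (out : List Int) : Prop := out = solution_alt numbers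
instance (numbers : List Int) (out : List Int) : Decidable (Spec_solution numbers out) := by unfold Spec_solution; infer_instance

-- ===== CLAIM (what is proved, stated in full; the proofs are below) =====
def Claim_equal_solution : Prop := ∀ (numbers : List Int), Dom_solution numbers → Spec_solution numbers (solution numbers)

-- ===== LEMMAS AND PROOFS =====

-- the three-element slice numbers[i:i+3], written out
lemma take3 (xs : List Int) (k : Nat) (h : k + 2 < xs.length) :
    (xs.drop k).take 3 = [xs[k], xs[k+1], xs[k+2]] := by
  induction xs generalizing k with
  | nil => simp at h
  | cons a t ih =>
    cases k with
    | zero =>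
      simp at h
      match t, h with
      | b :: c :: t', _ => simp
    | succ k' => simpa using ih k' (by simpa using h)

-- pointwise fact: opposite strict adjacent relations ⟺ peak or valley at the middle element
lemma key (a b c : Int) :
    (if ((if a < b then (1:Int) else 0) - (if b < a then (1:Int) else 0)) *
        ((if b < c then (1:Int) else 0) - (if c < b then (1:Int) else 0)) = -1 then (1:Int) else 0)
    = if (a < b ∧ b > c) ∨ (a > b ∧ b < c) then (1:Int) else 0 := by
  rcases lt_trichotomy a b with h | h | h <;> rcases lt_trichotomy b c with h2 | h2 | h2 <;>
    simp [h, h2, not_lt_of_gt]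

lemma solution_eq_alt (xs : List Int) : solution xs = solution_alt xs := by
  unfold solution solution_alt
  simp only []
  rw [PySem.List.foldl_append_singleton_eq_map]
  simp only [List.nil_append]
  apply List.map_congr_left
  intro i hi
  obtain ⟨h0, h1⟩ := (PySem.List.mem_pyRange_one).mp hi
  lift i to ℕ using h0 with k
  have hk : k + 2 < xs.length := by omega
  have hsl : PySem.List.slice xs (some (k:Int)) (some ((k:Int) + 3)) = [xs[k], xs[k+1], xs[k+2]] := by
    have h3 : ((k:Int) + 3) = ((k:Int) + ((3:Nat):Int)) := by norm_num
    rw [h3, PySem.List.slice_natCast_add, take3 xs k hk]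
  have e0 : PySem.List.pyGetD xs (k:Int) 0 = xs[k] := by
    rw [PySem.List.pyGetD_eq_getElem xs 0 (by omega) (by omega)]
    simp
  have e1 : PySem.List.pyGetD xs ((k:Int) + 1) 0 = xs[k+1] := by
    rw [PySem.List.pyGetD_eq_getElem xs 0 (by omega) (by omega)]
    simp only [show ((k:Int)+1).toNat = k+1 from by omega]
  have e2 : PySem.List.pyGetD xs ((k:Int) + 1 + 1) 0 = xs[k+2] := by
    rw [PySem.List.pyGetD_eq_getElem xs 0 (by omega) (by omega)]
    simp only [show ((k:Int)+1+1).toNat = k+2 from by omega]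
  have w0 : PySem.List.pyGetD [xs[k], xs[k+1], xs[k+2]] (0:Int) 0 = xs[k] := by
    rw [PySem.List.pyGetD_eq_getElem _ 0 (by norm_num) (by norm_num)]; simp
  have w1 : PySem.List.pyGetD [xs[k], xs[k+1], xs[k+2]] (1:Int) 0 = xs[k+1] := by
    rw [PySem.List.pyGetD_eq_getElem _ 0 (by norm_num) (by norm_num)]; simp
  have w2 : PySem.List.pyGetD [xs[k], xs[k+1], xs[k+2]] (2:Int) 0 = xs[k+2] := by
    rw [PySem.List.pyGetD_eq_getElem _ 0 (by norm_num) (by norm_num)]; simp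
  rw [hsl, w0, w1, w2,
      PySem.List.pyGetD_map_pyRange_of_nonneg _ _ _ _ (by omega) (by omega),
      PySem.List.pyGetD_map_pyRange_of_nonneg _ _ _ _ (by omega) (by omega),
      e0, e1, e2]
  exact (key xs[k] xs[k+1] xs[k+2]).symm

-- ===== VERDICT (by name: the statement is the Claim_ definition above) =====
theorem solution_spec : Claim_equal_solution := by
  intro numbers _
  unfold Spec_solution
  exact solution_eq_alt numbers
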